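-- pv_equiv track=rewrite | github.com/clranc/HostGrab | IpDmLL.py | tabCount
-- ===== SOURCE A (Python) =====
-- def tabCount(IpString):
--     length = len(IpString)
--     count = 0
--     if length <= 8:
--        count = 6
--     elif length > 8 and length <= 16:
--        count = 5
--     elif length > 16 and length <= 24:
--        count = 4
--     elif length > 24 and length <= 32:
--        count = 3
--     else:
--        count = 2
--     TabString = ""
--     while count != 0:
--        TabString = TabString + "\t"
--        count = count - 1
--
--     return str(TabString)
-- ===== SOURCE B (Python) =====
-- def tabCount(IpString):
--     bucket = (len(IpString) - 1) // 8
--     return "\t" * min(6, max(2, 6 - bucket))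
-- ===== Notes on version B (the rewrite author's own statement) =====
-- stated objective: simpler
-- what changed: Replaces the 5-branch if/elif ladder and the tab-appending while loop with one closed-form clamped floor-division expression and string repetition.
import Mathlib
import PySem

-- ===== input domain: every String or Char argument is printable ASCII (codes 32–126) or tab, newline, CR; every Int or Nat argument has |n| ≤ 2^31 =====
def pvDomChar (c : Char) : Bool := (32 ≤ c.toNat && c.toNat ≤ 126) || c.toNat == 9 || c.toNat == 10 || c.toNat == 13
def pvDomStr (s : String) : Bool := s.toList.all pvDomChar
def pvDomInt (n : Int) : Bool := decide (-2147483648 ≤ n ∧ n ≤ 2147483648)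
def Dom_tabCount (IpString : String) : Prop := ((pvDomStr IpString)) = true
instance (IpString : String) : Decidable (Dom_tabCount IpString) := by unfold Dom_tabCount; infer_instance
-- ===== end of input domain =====

-- B replaces A's if/elif ladder and tab-appending while loop with one clamped
-- floor-division formula and string repetition (objective: simpler).

-- ===== PORT A =====
-- the 'while count != 0: TabString = TabString + "\t"; count = count - 1' loop;
-- Python str '+' is ported exactly as concatenation of the code-point lists
def tabLoopA : Nat → String → String
  | 0, acc => acc
  | Nat.succ n, acc => tabLoopA n (String.ofList (acc.toList ++ ['\t']))

def tabCount (IpString : String) : String :=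
  let length : Int := PySem.Str.len IpString
  let count : Nat :=
    if length ≤ 8 then 6
    else if 8 < length ∧ length ≤ 16 then 5
    else if 16 < length ∧ length ≤ 24 then 4
    else if 24 < length ∧ length ≤ 32 then 3
    else 2
  tabLoopA count ""

-- ===== PORT B =====
def tabCount_alt (IpString : String) : String :=
  let bucket : Int := PySem.Int.floordiv ((PySem.Str.len IpString : Int) - 1) 8
  let count : Int := min 6 (max 2 (6 - bucket))
  String.ofList (List.replicate count.toNat '\t')

-- ===== PRECONDITION & SPEC =====
def Spec_tabCount (IpString : String) (out : String) : Prop := out = tabCount_alt IpString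
instance (IpString : String) (out : String) : Decidable (Spec_tabCount IpString out) := by unfold Spec_tabCount; infer_instance

-- ===== CLAIM (what is proved, stated in full; the proofs are below) =====
def Claim_equal_tabCount : Prop := ∀ (IpString : String), Dom_tabCount IpString → Spec_tabCount IpString (tabCount IpString)

-- ===== LEMMAS AND PROOFS =====
theorem tabLoopA_mk (n : Nat) (l : List Char) :
    tabLoopA n (String.ofList l) = String.ofList (l ++ List.replicate n '\t') := by
  induction n generalizing l with
  | zero => simp [tabLoopA]
  | succ k ih =>
      simp only [tabLoopA]
      rw [show (String.ofList l).toList = l by simp, ih]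
      congr 1
      rw [List.append_assoc, List.singleton_append, List.replicate_succ]

theorem tabLoopA_eq (n : Nat) :
    tabLoopA n "" = String.ofList (List.replicate n '\t') := by
  calc tabLoopA n "" = tabLoopA n (String.ofList []) := rfl
    _ = String.ofList ([] ++ List.replicate n '\t') := tabLoopA_mk n []
    _ = String.ofList (List.replicate n '\t') := by rw [List.nil_append]

theorem count_eq (n : Int) :
    ((if n ≤ 8 then 6
      else if 8 < n ∧ n ≤ 16 then 5
      else if 16 < n ∧ n ≤ 24 then 4
      else if 24 < n ∧ n ≤ 32 then 3
      else 2 : Nat) : Int)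
    = min 6 (max 2 (6 - PySem.Int.floordiv (n - 1) 8)) := by
  have h8 : (0 : Int) < 8 := by norm_num
  have hle := fun q => PySem.Int.le_floordiv_iff_mul_le (a := n - 1) (b := 8) (q := q) h8
  have hlt := fun q => PySem.Int.floordiv_lt_iff_lt_mul (a := n - 1) (b := 8) (q := q) h8
  split_ifs with h1 h2 h3 h4
  · have : PySem.Int.floordiv (n - 1) 8 < 1 := (hlt 1).2 (by push_cast; omega)
    omega
  · have hu : PySem.Int.floordiv (n - 1) 8 < 2 := (hlt 2).2 (by push_cast; omega)
    have hl : (1 : Int) ≤ PySem.Int.floordiv (n - 1) 8 := (hle 1).2 (by push_cast; omega)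
    omega
  · have hu : PySem.Int.floordiv (n - 1) 8 < 3 := (hlt 3).2 (by push_cast; omega)
    have hl : (2 : Int) ≤ PySem.Int.floordiv (n - 1) 8 := (hle 2).2 (by push_cast; omega)
    omega
  · have hu : PySem.Int.floordiv (n - 1) 8 < 4 := (hlt 4).2 (by push_cast; omega)
    have hl : (3 : Int) ≤ PySem.Int.floordiv (n - 1) 8 := (hle 3).2 (by push_cast; omega)
    omega
  · have hl : (4 : Int) ≤ PySem.Int.floordiv (n - 1) 8 := (hle 4).2 (by push_cast; omega)
    omega

-- ===== VERDICT (by name: the statement is the Claim_ definition above) =====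
theorem tabCount_spec : Claim_equal_tabCount := by
  intro s _
  unfold Spec_tabCount tabCount tabCount_alt
  rw [tabLoopA_eq]
  have h := count_eq (PySem.Str.len s)
  have : (min 6 (max 2 (6 - PySem.Int.floordiv ((PySem.Str.len s : Int) - 1) 8))).toNat
      = (if PySem.Str.len s ≤ 8 then 6
         else if 8 < PySem.Str.len s ∧ PySem.Str.len s ≤ 16 then 5
         else if 16 < PySem.Str.len s ∧ PySem.Str.len s ≤ 24 then 4
         else if 24 < PySem.Str.len s ∧ PySem.Str.len s ≤ 32 then 3
         else 2 : Nat) := by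
    rw [← h]; exact Int.toNat_natCast _
  exact congrArg (fun c => String.ofList (List.replicate c '\t')) this.symm
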